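-- pv_equiv track=rewrite | github.com/abdulatifhalm-pixel/Python-Project | love_calculator.py | love_calculator
-- ===== SOURCE A (Python) =====
-- def love_calculator(name1, name2):
--     # Convert names to lowercase and remove spaces
--     name1 = name1.lower().replace(" ", "")
--     name2 = name2.lower().replace(" ", "")
--
--     # Combine names
--     combined_names = name1 + name2
--
--     # Count letters in the word "love"
--     score = 0
--     for char in "love":
--         score += combined_names.count(char)
--
--     # Generate percentage
--     love_percentage = (score * 10) % 101
--
--     return love_percentage
-- ===== SOURCE B (Python) =====
-- def love_calculator(name1, name2):
--     # Simpler: one pass over the combined string instead of four .count scans.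
--     combined = name1.lower().replace(" ", "") + name2.lower().replace(" ", "")
--     score = 0
--     for ch in combined:
--         if ch in ('l', 'o', 'v', 'e'):
--             score += 1
--     return (score * 10) % 101
-- ===== Notes on version B (the rewrite author's own statement) =====
-- stated objective: simpler
-- what changed: Replaces A's loop over the letters of "love" (four .count scans of the combined string) with a single explicit pass over the combined string that increments the score whenever the character is one of l/o/v/e.
import Mathlib
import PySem

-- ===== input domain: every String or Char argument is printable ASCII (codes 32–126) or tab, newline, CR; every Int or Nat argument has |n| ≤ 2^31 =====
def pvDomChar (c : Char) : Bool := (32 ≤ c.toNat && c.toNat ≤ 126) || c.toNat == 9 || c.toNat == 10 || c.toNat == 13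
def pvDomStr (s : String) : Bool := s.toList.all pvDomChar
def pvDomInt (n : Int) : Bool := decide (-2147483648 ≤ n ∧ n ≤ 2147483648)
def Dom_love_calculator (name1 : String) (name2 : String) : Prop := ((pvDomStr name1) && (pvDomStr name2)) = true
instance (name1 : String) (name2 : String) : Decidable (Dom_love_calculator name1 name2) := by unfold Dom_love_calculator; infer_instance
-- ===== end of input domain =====

-- B makes a single pass over the combined string (counting characters in {l,o,v,e}) instead of A's four .count scans; objective: simpler.


-- ===== PORT A =====
def love_calculator (name1 : String) (name2 : String) : Int :=
  let n1 := PySem.Str.replace (PySem.Str.lower name1) " " ""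
  let n2 := PySem.Str.replace (PySem.Str.lower name2) " " ""
  let combined_names := n1 ++ n2
  let score := ("love".toList).foldl
    (fun acc ch => acc + (PySem.Str.count combined_names (String.singleton ch) : Int)) (0 : Int)
  PySem.Int.mod (score * 10) 101

-- ===== PORT B =====
def love_calculator_alt (name1 : String) (name2 : String) : Int :=
  let combined := PySem.Str.replace (PySem.Str.lower name1) " " "" ++
                  PySem.Str.replace (PySem.Str.lower name2) " " ""
  let score := combined.toList.foldl
    (fun acc ch => if ch ∈ ['l', 'o', 'v', 'e'] then acc + 1 else acc) (0 : Int)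
  PySem.Int.mod (score * 10) 101

-- ===== PRECONDITION & SPEC =====
def Spec_love_calculator (name1 : String) (name2 : String) (out : Int) : Prop := out = love_calculator_alt name1 name2
instance (name1 : String) (name2 : String) (out : Int) : Decidable (Spec_love_calculator name1 name2 out) := by unfold Spec_love_calculator; infer_instance

-- ===== CLAIM (what is proved, stated in full; the proofs are below) =====
def Claim_equal_love_calculator : Prop := ∀ (name1 : String) (name2 : String), Dom_love_calculator name1 name2 → Spec_love_calculator name1 name2 (love_calculator name1 name2)

-- ===== LEMMAS AND PROOFS =====

-- Chars.count.go with a single-character needle counts occurrences of that character.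
theorem pv_count_go_single (c : Char) (l : List Char) : ∀ (fuel acc : Nat), l.length ≤ fuel →
    PySem.Chars.count.go [c] fuel l acc = acc + l.count c := by
  induction l with
  | nil => intro fuel acc h; cases fuel <;> simp [PySem.Chars.count.go]
  | cons a t ih =>
    intro fuel acc h
    cases fuel with
    | zero => simp at h
    | succ f =>
      simp at h
      rw [PySem.Chars.count.go]
      by_cases hc : c = a
      · subst hc
        simp only [List.isPrefixOf, beq_self_eq_true, Bool.true_and, if_pos]
        simp only [List.length_cons, List.length_nil, Nat.zero_add, List.drop_succ_cons,
          List.drop_zero]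
        rw [ih f (acc + 1) h]
        simp
        omega
      · have hpre : ([c].isPrefixOf (a :: t)) = false := by simp [List.isPrefixOf, hc]
        rw [hpre]
        simp only [Bool.false_eq_true, ite_false]
        rw [ih f acc h]
        simp [Ne.symm hc]

-- Chars.count with a single-character needle is the plain character count.
theorem pv_count_single (l : List Char) (c : Char) : PySem.Chars.count l [c] = l.count c := by
  simp [PySem.Chars.count, pv_count_go_single c l l.length _ le_rfl]

-- Counting characters that lie in {l,o,v,e} equals the sum of the four individual counts.
theorem pv_countP_love (l : List Char) :
    (l.countP (fun ch => ch ∈ ['l', 'o', 'v', 'e']) : Int) =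
      (l.count 'l' : Int) + l.count 'o' + l.count 'v' + l.count 'e' := by
  induction l with
  | nil => simp
  | cons a t ih =>
    simp only [List.countP_cons, List.count_cons]
    by_cases h1 : a = 'l' <;> by_cases h2 : a = 'o' <;> by_cases h3 : a = 'v' <;>
      by_cases h4 : a = 'e' <;>
      simp_all [List.mem_cons] <;> omega

-- A's four-scan score equals B's single-pass score, on any character list.
theorem pv_scores (l : List Char) :
    ("love".toList).foldl (fun acc ch => acc + (PySem.Chars.count l [ch] : Int)) (0 : Int)
      = l.foldl (fun acc ch => if ch ∈ ['l', 'o', 'v', 'e'] then acc + 1 else acc) (0 : Int) := by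
  rw [PySem.List.foldl_ite_add_one]
  have hlove : ("love".toList) = ['l', 'o', 'v', 'e'] := rfl
  rw [hlove]
  simp only [List.foldl_cons, List.foldl_nil, pv_count_single]
  rw [pv_countP_love]
  ring

-- ===== VERDICT (by name: the statement is the Claim_ definition above) =====
theorem love_calculator_spec : Claim_equal_love_calculator := by
  intro name1 name2 _
  unfold Spec_love_calculator love_calculator love_calculator_alt
  dsimp only
  have hs : ∀ c : Char, (String.singleton c).toList = [c] := fun c => by simp
  simp only [PySem.Str.count_eq, hs]
  rw [pv_scores]
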